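-- pv_equiv track=rewrite | github.com/OpenFreeEnergy/alchemiscale | fah_alchemy/models.py | _hierarchy_valid
-- ===== SOURCE A (Python) =====
-- from typing import Optional, Union
--
-- def _is_wildcard(char: Union[str, None]) -> bool:
--     if char is None or char == "*":
--         return True
--     else:
--         return False
--
-- def _find_wildcard(scope_list: list) -> Union[int, None]:
--     """Finds the index of the first wildcard in a scope list."""
--     for i, scope in enumerate(scope_list):
--         if _is_wildcard(scope):
--             return i
--     return None
--
-- def _hierarchy_valid(scope_dict: dict[str : Union[str, None]]) -> bool:
--     """Checks that the scope hierarchy is valid from a dictionary of scope components."""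
--
--     org = scope_dict.get("org")
--     campaign = scope_dict.get("campaign")
--     project = scope_dict.get("project")
--     scope_list = [org, campaign, project]
--
--     first_wildcard_ix = _find_wildcard(scope_list)
--     if first_wildcard_ix is None:  # no wildcards, so we're good
--         return True
--
--     sublevels = scope_list[first_wildcard_ix:]
--     # now check if any of the sublevels are not wildcards
--     if any([not _is_wildcard(i) for i in sublevels]):
--         return False
--     return True
-- ===== SOURCE B (Python) =====
-- def _hierarchy_valid(scope_dict: dict) -> bool:
--     """Checks that the scope hierarchy is valid from a dictionary of scope components."""
--     seen_wildcard = False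
--     for level in (scope_dict.get("org"), scope_dict.get("campaign"), scope_dict.get("project")):
--         if level is None or level == "*":
--             seen_wildcard = True
--         elif seen_wildcard:
--             return False
--     return True
-- ===== Notes on version B (the rewrite author's own statement) =====
-- stated objective: simpler
-- what changed: Replaced A's two-pass find-first-wildcard-index-then-slice-and-rescan structure (three helper passes plus a slice) with a single forward pass carrying a seen_wildcard flag that returns False as soon as a concrete level follows a wildcard.
import Mathlib
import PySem

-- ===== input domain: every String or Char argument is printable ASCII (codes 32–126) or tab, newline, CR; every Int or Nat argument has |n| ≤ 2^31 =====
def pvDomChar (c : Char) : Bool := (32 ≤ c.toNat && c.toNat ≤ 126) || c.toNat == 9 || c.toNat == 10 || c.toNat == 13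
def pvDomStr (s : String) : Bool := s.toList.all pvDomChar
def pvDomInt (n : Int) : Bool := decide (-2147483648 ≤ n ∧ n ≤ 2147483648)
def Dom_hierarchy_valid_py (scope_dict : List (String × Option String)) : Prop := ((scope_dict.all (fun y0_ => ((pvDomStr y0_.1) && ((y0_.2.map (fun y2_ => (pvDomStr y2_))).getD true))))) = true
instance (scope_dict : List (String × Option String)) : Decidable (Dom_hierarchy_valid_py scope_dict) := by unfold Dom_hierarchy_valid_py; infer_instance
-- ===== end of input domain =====

-- B replaces A's find-first-wildcard-then-rescan-the-suffix structure with one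
-- flag-carrying pass; objective: simpler, same cost.

-- ===== PORT A =====
-- _is_wildcard
def isWildcardPy (char : Option String) : Bool :=
  if char = none ∨ char = some "*" then true else false

-- _find_wildcard: enumerate with index, return first wildcard index
def findWildcardAux (i : Int) : List (Option String) → Option Int
  | [] => none
  | scope :: rest => if isWildcardPy scope then some i else findWildcardAux (i + 1) rest

def findWildcardPy (scope_list : List (Option String)) : Option Int :=
  findWildcardAux 0 scope_list

-- dict.get(k): first matching key in the association list, else None (flattened:
-- a stored None and a missing key both give None, as in Python)
def dictGetPy (d : List (String × Option String)) (k : String) : Option String :=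
  (Option.map Prod.snd (d.find? (fun kv => kv.1 == k))).join

def hierarchy_valid_py (scope_dict : List (String × Option String)) : Bool :=
  let org := dictGetPy scope_dict "org"
  let campaign := dictGetPy scope_dict "campaign"
  let project := dictGetPy scope_dict "project"
  let scope_list := [org, campaign, project]
  match findWildcardPy scope_list with
  | none => true
  | some first_wildcard_ix =>
    let sublevels := PySem.List.slice scope_list (some first_wildcard_ix) none
    if (sublevels.map (fun i => !isWildcardPy i)).any (fun x => x) then false
    else true

-- ===== PORT B =====
-- single pass with a seen_wildcard accumulator; early return False on a
-- concrete level after a wildcard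
def altLoop (seen_wildcard : Bool) : List (Option String) → Bool
  | [] => true
  | level :: rest =>
    if level = none ∨ level = some "*" then altLoop true rest
    else if seen_wildcard then false
    else altLoop seen_wildcard rest

def hierarchy_valid_py_alt (scope_dict : List (String × Option String)) : Bool :=
  altLoop false
    [dictGetPy scope_dict "org",
     dictGetPy scope_dict "campaign",
     dictGetPy scope_dict "project"]

-- ===== PRECONDITION & SPEC =====
def Spec_hierarchy_valid_py (scope_dict : List (String × Option String)) (out : Bool) : Prop := out = hierarchy_valid_py_alt scope_dict
instance (scope_dict : List (String × Option String)) (out : Bool) : Decidable (Spec_hierarchy_valid_py scope_dict out) := by unfold Spec_hierarchy_valid_py; infer_instance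

-- ===== CLAIM (what is proved, stated in full; the proofs are below) =====
def Claim_equal_hierarchy_valid_py : Prop := ∀ (scope_dict : List (String × Option String)), Dom_hierarchy_valid_py scope_dict → Spec_hierarchy_valid_py scope_dict (hierarchy_valid_py scope_dict)

-- ===== LEMMAS AND PROOFS =====
theorem both_eq (o c p : Option String) :
    (match findWildcardPy [o, c, p] with
      | none => true
      | some ix =>
        if ((PySem.List.slice [o, c, p] (some ix) none).map
              (fun i => !isWildcardPy i)).any (fun x => x) then false else true) =
    altLoop false [o, c, p] := by
  by_cases ho : o = none ∨ o = some "*" <;>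
  by_cases hc : c = none ∨ c = some "*" <;>
  by_cases hp : p = none ∨ p = some "*" <;>
    simp [findWildcardPy, findWildcardAux, altLoop, isWildcardPy, ho, hc, hp,
      PySem.List.slice] <;> exact not_or.mp hp

-- ===== VERDICT (by name: the statement is the Claim_ definition above) =====
theorem hierarchy_valid_py_spec : Claim_equal_hierarchy_valid_py := by
  intro d _
  unfold Spec_hierarchy_valid_py hierarchy_valid_py hierarchy_valid_py_alt
  exact both_eq _ _ _
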